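-- pv_equiv track=rewrite | github.com/seb155/3-ATLAS | apps/cortex/backend/app/context/temporal.py | _generate_diff_summary
-- ===== SOURCE A (Python) =====
-- from typing import List, Dict, Any, Optional
--
-- def _generate_diff_summary(
--
--     before: Dict[str, Any],
--     after: Dict[str, Any]
-- ) -> str:
--     """Generate a brief summary of differences."""
--     added = set(after.keys()) - set(before.keys())
--     removed = set(before.keys()) - set(after.keys())
--     changed = {
--         k for k in set(before.keys()) & set(after.keys())
--         if before[k] != after[k]
--     }
--
--     parts = []
--     if added:
--         parts.append(f"+{len(added)} keys")
--     if removed: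
--         parts.append(f"-{len(removed)} keys")
--     if changed:
--         parts.append(f"~{len(changed)} modified")
--
--     return ", ".join(parts) if parts else "no structural changes"
-- ===== SOURCE B (Python) =====
-- def _generate_diff_summary(before, after):
--     """Sort both item lists by key and classify every key in one two-pointer merge."""
--     b = sorted(before.items(), key=lambda kv: kv[0])
--     a = sorted(after.items(), key=lambda kv: kv[0])
--     added = removed = changed = 0
--     i = j = 0
--     while i < len(b) and j < len(a):
--         kb, vb = b[i]
--         ka, va = a[j]
--         if kb < ka:
--             removed += 1
--             i += 1
--         elif ka < kb:
--             added += 1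
--             j += 1
--         else:
--             if vb != va:
--                 changed += 1
--             i += 1
--             j += 1
--     removed += len(b) - i
--     added += len(a) - j
--     parts = []
--     if added:
--         parts.append(f"+{added} keys")
--     if removed:
--         parts.append(f"-{removed} keys")
--     if changed:
--         parts.append(f"~{changed} modified")
--     return ", ".join(parts) if parts else "no structural changes"
-- ===== Notes on version B (the rewrite author's own statement) =====
-- stated objective: alternative
-- what changed: Replaces A's hash-based set differences/intersection with a sort-then-merge algorithm: both item lists are sorted by key and a single two-pointer merge classifies every key as added, removed or changed, after which the same summary string is built.
import Mathlib
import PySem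

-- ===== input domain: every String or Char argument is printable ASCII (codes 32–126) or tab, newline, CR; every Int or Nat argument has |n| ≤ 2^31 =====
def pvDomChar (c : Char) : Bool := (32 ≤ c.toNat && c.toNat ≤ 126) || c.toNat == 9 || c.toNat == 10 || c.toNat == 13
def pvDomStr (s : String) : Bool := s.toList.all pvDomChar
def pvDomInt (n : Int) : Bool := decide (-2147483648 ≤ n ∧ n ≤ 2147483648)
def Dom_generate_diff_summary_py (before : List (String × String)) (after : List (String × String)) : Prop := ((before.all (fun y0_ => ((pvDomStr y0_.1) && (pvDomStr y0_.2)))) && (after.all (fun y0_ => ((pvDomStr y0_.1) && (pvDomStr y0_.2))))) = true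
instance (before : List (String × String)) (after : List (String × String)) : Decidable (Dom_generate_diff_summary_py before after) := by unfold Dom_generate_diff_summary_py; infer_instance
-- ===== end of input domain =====

-- B replaces A's set-difference/intersection computation by a sort-then-merge algorithm:
-- both item lists are sorted by key and one two-pointer merge classifies every key (alternative algorithm, same result).

-- ===== PORT A =====
-- literal port of _generate_diff_summary: set difference / difference / filtered intersection, then join.
-- before[k] / after[k] (both keys present on the intersection) are ported as Dict.get?; comparing the
-- two `some`-wrapped values with != is exact there.
def generate_diff_summary_py (before : List (String × String)) (after : List (String × String)) : String :=
  let db := PySem.Dict.mk before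
  let da := PySem.Dict.mk after
  let added : PySem.Set String := PySem.Set.diff (PySem.Set.ofList da.keys) (PySem.Set.ofList db.keys)
  let removed : PySem.Set String := PySem.Set.diff (PySem.Set.ofList db.keys) (PySem.Set.ofList da.keys)
  let changed : PySem.Set String :=
    (PySem.Set.inter (PySem.Set.ofList db.keys) (PySem.Set.ofList da.keys)).filter
      (fun k => db.get? k != da.get? k)
  let parts : List String := []
  let parts := if !added.isEmpty then parts ++ ["+" ++ PySem.Int.toStr (PySem.Set.len added) ++ " keys"] else parts
  let parts := if !removed.isEmpty then parts ++ ["-" ++ PySem.Int.toStr (PySem.Set.len removed) ++ " keys"] else parts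
  let parts := if !changed.isEmpty then parts ++ ["~" ++ PySem.Int.toStr (PySem.Set.len changed) ++ " modified"] else parts
  if !parts.isEmpty then PySem.Str.join ", " parts else "no structural changes"

-- ===== PORT B =====
-- Source B's while loop over the two sorted lists, as the standard structural two-list recursion:
-- each step consumes the smaller head (removed/added) or both heads (possibly changed); the
-- trailing `removed += len(b) - i` / `added += len(a) - j` are the one-sided base cases.
def pvMerge : List (String × String) → List (String × String) → Int × Int × Int
  | [], la => ((la.length : Int), 0, 0)
  | _ :: lb, [] => (0, (lb.length : Int) + 1, 0)
  | (kb, vb) :: lb, (ka, va) :: la =>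
      if kb < ka then
        let m := pvMerge lb ((ka, va) :: la); (m.1, m.2.1 + 1, m.2.2)
      else if ka < kb then
        let m := pvMerge ((kb, vb) :: lb) la; (m.1 + 1, m.2.1, m.2.2)
      else
        let m := pvMerge lb la
        (m.1, m.2.1, if vb != va then m.2.2 + 1 else m.2.2)
  termination_by lb la => lb.length + la.length

-- port of Source B: sort both item lists by key, run the merge, build the parts list from the counters.
def generate_diff_summary_py_alt (before : List (String × String)) (after : List (String × String)) : String :=
  let b := PySem.List.sorted before (fun kv => kv.1) false
  let a := PySem.List.sorted after (fun kv => kv.1) false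
  let m := pvMerge b a
  let parts : List String := []
  let parts := if m.1 ≠ 0 then parts ++ ["+" ++ PySem.Int.toStr m.1 ++ " keys"] else parts
  let parts := if m.2.1 ≠ 0 then parts ++ ["-" ++ PySem.Int.toStr m.2.1 ++ " keys"] else parts
  let parts := if m.2.2 ≠ 0 then parts ++ ["~" ++ PySem.Int.toStr m.2.2 ++ " modified"] else parts
  if !parts.isEmpty then PySem.Str.join ", " parts else "no structural changes"

-- ===== PRECONDITION & SPEC =====
-- The parameters model Python dicts, whose keys are necessarily distinct; an association list with a
-- repeated key corresponds to no Python dict input, so Pre_ only requires the key lists to be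
-- duplicate-free (it excludes no input the Python function accepts).
def Pre_generate_diff_summary_py (before : List (String × String)) (after : List (String × String)) : Prop :=
  (before.map Prod.fst).Nodup ∧ (after.map Prod.fst).Nodup
instance (before : List (String × String)) (after : List (String × String)) : Decidable (Pre_generate_diff_summary_py before after) := by unfold Pre_generate_diff_summary_py; infer_instance

def pvWitness_generate_diff_summary_py : (List (String × String)) × (List (String × String)) :=
  ([("a", "1"), ("c", "5")], [("a", "2"), ("b", "3")])

def Spec_generate_diff_summary_py (before : List (String × String)) (after : List (String × String)) (out : String) : Prop := out = generate_diff_summary_py_alt before after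
instance (before : List (String × String)) (after : List (String × String)) (out : String) : Decidable (Spec_generate_diff_summary_py before after out) := by unfold Spec_generate_diff_summary_py; infer_instance

-- ===== CLAIM (what is proved, stated in full; the proofs are below) =====
def Claim_equal_generate_diff_summary_py : Prop := ∀ (before : List (String × String)) (after : List (String × String)), Dom_generate_diff_summary_py before after → Pre_generate_diff_summary_py before after → Spec_generate_diff_summary_py before after (generate_diff_summary_py before after)

-- ===== LEMMAS AND PROOFS =====

-- shared rendering of the summary string from the three counts (proof-only helper)
def pvRender (a r c : Int) : String :=
  let parts : List String :=
    (if a ≠ 0 then ["+" ++ PySem.Int.toStr a ++ " keys"] else []) ++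
    (if r ≠ 0 then ["-" ++ PySem.Int.toStr r ++ " keys"] else []) ++
    (if c ≠ 0 then ["~" ++ PySem.Int.toStr c ++ " modified"] else [])
  if !parts.isEmpty then PySem.Str.join ", " parts else "no structural changes"

theorem pvGetMkNodup (d : List (String × String)) (k v : String)
    (h : (d.map Prod.fst).Nodup) (hm : (k, v) ∈ d) :
    (PySem.Dict.mk d).get? k = some v := by
  simp only [PySem.Dict.get?]
  show Option.map _ (List.find? _ d) = _
  induction d with
  | nil => cases hm
  | cons a t ih =>
    simp only [List.map_cons, List.nodup_cons] at h
    rcases List.mem_cons.mp hm with hm' | hm'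
    · subst hm'; simp
    · have hne : ¬ (a.1 == k) = true := by
        simp only [beq_iff_eq]
        intro he
        exact h.1 (he ▸ List.mem_map_of_mem (f := Prod.fst) hm')
      rw [List.find?_cons_of_neg (by simpa using hne)]
      exact ih h.2 hm'

-- two duplicate-free key lists count a symmetric "in both and P" predicate identically
theorem pvCountPSwap (l1 l2 : List String) (P : String → Bool)
    (h1 : l1.Nodup) (h2 : l2.Nodup) :
    l1.countP (fun k => l2.contains k && P k) = l2.countP (fun k => l1.contains k && P k) := by
  rw [List.countP_eq_length_filter, List.countP_eq_length_filter]
  apply List.Perm.length_eq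
  apply (List.perm_ext_iff_of_nodup (h1.filter _) (h2.filter _)).mpr
  intro a
  simp only [List.mem_filter, Bool.and_eq_true, List.contains_iff_mem]
  tauto

theorem pvA_eq_render (before after : List (String × String))
    (hb : (before.map Prod.fst).Nodup) (ha : (after.map Prod.fst).Nodup) :
    generate_diff_summary_py before after
      = pvRender
          (↑(after.countP (fun kv => !((before.map Prod.fst).contains kv.1))))
          (↑(before.countP (fun kv => !((after.map Prod.fst).contains kv.1))))
          (↑(after.countP (fun kv => ((before.map Prod.fst).contains kv.1)
              && ((PySem.Dict.mk before).get? kv.1 != some kv.2)))) := by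
  have hA : (List.filter (fun x => !PySem.Set.contains (List.map Prod.fst before) x) (List.map Prod.fst after)).length
      = after.countP (fun kv => !((before.map Prod.fst).contains kv.1)) := by
    rw [← List.countP_eq_length_filter, List.countP_map]; rfl
  have hR : (List.filter (fun x => !PySem.Set.contains (List.map Prod.fst after) x) (List.map Prod.fst before)).length
      = before.countP (fun kv => !((after.map Prod.fst).contains kv.1)) := by
    rw [← List.countP_eq_length_filter, List.countP_map]; rfl
  have hC : (List.filter (fun k => (PySem.Dict.mk before).get? k != (PySem.Dict.mk after).get? k)
        (List.filter (fun x => PySem.Set.contains (List.map Prod.fst after) x) (List.map Prod.fst before))).length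
      = after.countP (fun kv => ((before.map Prod.fst).contains kv.1)
              && ((PySem.Dict.mk before).get? kv.1 != some kv.2)) := by
    rw [← List.countP_eq_length_filter, List.countP_filter]
    have h1 : (List.map Prod.fst before).countP
        (fun a => ((PySem.Dict.mk before).get? a != (PySem.Dict.mk after).get? a) && PySem.Set.contains (List.map Prod.fst after) a)
        = (List.map Prod.fst before).countP
        (fun a => (List.map Prod.fst after).contains a && ((PySem.Dict.mk before).get? a != (PySem.Dict.mk after).get? a)) := by
      apply List.countP_congr; intro a _; simp [Bool.and_comm]
    rw [h1, pvCountPSwap _ _ _ hb ha, List.countP_map]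
    apply List.countP_congr
    intro kv hkv
    have hg : (PySem.Dict.mk after).get? kv.1 = some kv.2 :=
      pvGetMkNodup after kv.1 kv.2 ha (by cases kv; exact hkv)
    simp only [Function.comp]
    rw [hg]
  simp only [generate_diff_summary_py, PySem.Dict.keys_mk]
  simp only [PySem.Set.ofList_eq_self_of_nodup _ hb, PySem.Set.ofList_eq_self_of_nodup _ ha]
  simp only [PySem.Set.diff, PySem.Set.inter]
  rw [← hA, ← hR, ← hC]
  set FA := List.filter (fun x => !PySem.Set.contains (List.map Prod.fst before) x) (List.map Prod.fst after) with hFA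
  set FR := List.filter (fun x => !PySem.Set.contains (List.map Prod.fst after) x) (List.map Prod.fst before) with hFR
  set FC := List.filter (fun k => (PySem.Dict.mk before).get? k != (PySem.Dict.mk after).get? k)
        (List.filter (fun x => PySem.Set.contains (List.map Prod.fst after) x) (List.map Prod.fst before)) with hFC
  clear hA hR hC hFA hFR hFC
  have hne : ∀ (n : Nat), ¬((n : Int) + 1 = 0) := by intro n; omega
  cases FA <;> cases FR <;> cases FC <;>
    simp [pvRender, PySem.Set.len, hne]

-- the merge computes exactly the three counts, on lists with strictly increasing keys
theorem pvMergeSpec (bs as : List (String × String)) :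
    bs.Pairwise (fun x y => x.1 < y.1) → as.Pairwise (fun x y => x.1 < y.1) →
    pvMerge bs as =
      ((as.countP (fun kv => !((bs.map Prod.fst).contains kv.1)) : Int),
       (bs.countP (fun kv => !((as.map Prod.fst).contains kv.1)) : Int),
       (as.countP (fun kv => ((bs.map Prod.fst).contains kv.1) &&
           ((PySem.Dict.mk bs).get? kv.1 != some kv.2)) : Int)) := by
  induction bs, as using pvMerge.induct with
  | case1 la =>
    intro _ _
    simp [pvMerge]
  | case2 p lb =>
    intro _ _
    simp [pvMerge]
  | case3 kb vb lb ka va la h ih =>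
    intro hb ha
    obtain ⟨hbh, hbt⟩ := List.pairwise_cons.mp hb
    have hlt : ∀ kv ∈ (ka, va) :: la, kb < kv.1 := by
      intro kv hkv
      rcases List.mem_cons.mp hkv with rfl | hkv'
      · exact h
      · exact lt_trans h ((List.pairwise_cons.mp ha).1 kv hkv')
    have hne : ∀ kv ∈ (ka, va) :: la, kv.1 ≠ kb := by
      intro kv hkv he
      exact lt_irrefl kb (he ▸ hlt kv hkv)
    have hnotin : kb ∉ ((ka, va) :: la).map Prod.fst := by
      intro hmem
      obtain ⟨kv, hkv, hkk⟩ := List.mem_map.mp hmem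
      exact lt_irrefl kb (hkk ▸ hlt kv hkv)
    have hAdd : ((ka, va) :: la).countP (fun kv => !(((kb, vb) :: lb).map Prod.fst).contains kv.1)
        = ((ka, va) :: la).countP (fun kv => !((lb.map Prod.fst).contains kv.1)) := by
      apply List.countP_congr
      intro kv hkv
      simp [hne kv hkv]
    have hChg : ((ka, va) :: la).countP (fun kv => (((kb, vb) :: lb).map Prod.fst).contains kv.1
          && ((PySem.Dict.mk ((kb, vb) :: lb)).get? kv.1 != some kv.2))
        = ((ka, va) :: la).countP (fun kv => ((lb.map Prod.fst).contains kv.1)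
          && ((PySem.Dict.mk lb).get? kv.1 != some kv.2)) := by
      apply List.countP_congr
      intro kv hkv
      rw [PySem.Dict.get?_mk_cons]
      simp [hne kv hkv, Ne.symm (hne kv hkv)]
    have hRem : ((kb, vb) :: lb).countP (fun kv => !(((ka, va) :: la).map Prod.fst).contains kv.1)
        = lb.countP (fun kv => !(((ka, va) :: la).map Prod.fst).contains kv.1) + 1 := by
      apply List.countP_cons_of_pos
      simpa using hnotin
    simp only [pvMerge, if_pos h]
    rw [ih hbt ha]
    refine Prod.ext ?_ (Prod.ext ?_ ?_) <;> simp only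
    · rw [hAdd]
    · rw [hRem]; push_cast; ring
    · rw [hChg]
  | case4 kb vb lb ka va la h1 h2 ih =>
    intro hb ha
    obtain ⟨hah, hat⟩ := List.pairwise_cons.mp ha
    have hlt : ∀ kv ∈ (kb, vb) :: lb, ka < kv.1 := by
      intro kv hkv
      rcases List.mem_cons.mp hkv with rfl | hkv'
      · exact h2
      · exact lt_trans h2 ((List.pairwise_cons.mp hb).1 kv hkv')
    have hne : ∀ kv ∈ (kb, vb) :: lb, kv.1 ≠ ka := by
      intro kv hkv he
      exact lt_irrefl ka (he ▸ hlt kv hkv)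
    have hnotin : ka ∉ ((kb, vb) :: lb).map Prod.fst := by
      intro hmem
      obtain ⟨kv, hkv, hkk⟩ := List.mem_map.mp hmem
      exact lt_irrefl ka (hkk ▸ hlt kv hkv)
    have hAdd : ((ka, va) :: la).countP (fun kv => !(((kb, vb) :: lb).map Prod.fst).contains kv.1)
        = la.countP (fun kv => !(((kb, vb) :: lb).map Prod.fst).contains kv.1) + 1 := by
      apply List.countP_cons_of_pos
      simpa using hnotin
    have hRem : ((kb, vb) :: lb).countP (fun kv => !(((ka, va) :: la).map Prod.fst).contains kv.1)
        = ((kb, vb) :: lb).countP (fun kv => !((la.map Prod.fst).contains kv.1)) := by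
      apply List.countP_congr
      intro kv hkv
      simp [hne kv hkv]
    have hChg : ((ka, va) :: la).countP (fun kv => (((kb, vb) :: lb).map Prod.fst).contains kv.1
          && ((PySem.Dict.mk ((kb, vb) :: lb)).get? kv.1 != some kv.2))
        = la.countP (fun kv => (((kb, vb) :: lb).map Prod.fst).contains kv.1
          && ((PySem.Dict.mk ((kb, vb) :: lb)).get? kv.1 != some kv.2)) := by
      apply List.countP_cons_of_neg
      simp only [List.map_cons, Bool.and_eq_true, not_and]
      intro hc
      exact absurd (by simpa using hc) (by simpa using hnotin)
    simp only [pvMerge, if_neg h1, if_pos h2]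
    rw [ih hb hat]
    refine Prod.ext ?_ (Prod.ext ?_ ?_) <;> simp only
    · rw [hAdd]; push_cast; ring
    · rw [hRem]
    · rw [hChg]
  | case5 kb vb lb ka va la h1 h2 ih =>
    intro hb ha
    have heq : kb = ka := le_antisymm (not_lt.mp h2) (not_lt.mp h1)
    obtain ⟨hbh, hbt⟩ := List.pairwise_cons.mp hb
    obtain ⟨hah, hat⟩ := List.pairwise_cons.mp ha
    have hneA : ∀ kv ∈ la, kv.1 ≠ kb := by
      intro kv hkv he
      exact lt_irrefl kv.1 (by calc kv.1 = kb := he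
                                 _ = ka := heq
                                 _ < kv.1 := hah kv hkv)
    have hneB : ∀ kv ∈ lb, kv.1 ≠ ka := by
      intro kv hkv he
      exact lt_irrefl kv.1 (by calc kv.1 = ka := he
                                 _ = kb := heq.symm
                                 _ < kv.1 := hbh kv hkv)
    have hAdd : ((ka, va) :: la).countP (fun kv => !(((kb, vb) :: lb).map Prod.fst).contains kv.1)
        = la.countP (fun kv => !((lb.map Prod.fst).contains kv.1)) := by
      rw [List.countP_cons_of_neg
            (p := fun kv : String × String => !(((kb, vb) :: lb).map Prod.fst).contains kv.1)
            (a := (ka, va)) (l := la) (by simp [heq.symm])]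
      apply List.countP_congr
      intro kv hkv
      simp [hneA kv hkv]
    have hRem : ((kb, vb) :: lb).countP (fun kv => !(((ka, va) :: la).map Prod.fst).contains kv.1)
        = lb.countP (fun kv => !((la.map Prod.fst).contains kv.1)) := by
      rw [List.countP_cons_of_neg
            (p := fun kv : String × String => !(((ka, va) :: la).map Prod.fst).contains kv.1)
            (a := (kb, vb)) (l := lb) (by simp [heq])]
      apply List.countP_congr
      intro kv hkv
      simp [hneB kv hkv]
    have hChg : ((ka, va) :: la).countP (fun kv => (((kb, vb) :: lb).map Prod.fst).contains kv.1
          && ((PySem.Dict.mk ((kb, vb) :: lb)).get? kv.1 != some kv.2))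
        = la.countP (fun kv => ((lb.map Prod.fst).contains kv.1)
          && ((PySem.Dict.mk lb).get? kv.1 != some kv.2)) + (if (vb != va) = true then 1 else 0) := by
      rw [List.countP_cons]
      congr 1
      · apply List.countP_congr
        intro kv hkv
        rw [PySem.Dict.get?_mk_cons]
        simp [hneA kv hkv, Ne.symm (hneA kv hkv)]
      · rw [PySem.Dict.get?_mk_cons]
        simp [heq, bne]
    simp only [pvMerge, if_neg h1, if_neg h2]
    rw [ih hbt hat]
    refine Prod.ext ?_ (Prod.ext ?_ ?_) <;> simp only
    · rw [hAdd]
    · rw [hRem]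
    · rw [hChg]
      by_cases hv : (vb != va) = true <;> simp [hv]

-- on duplicate-free keys, sorting by key yields strictly increasing keys
theorem pvStrictSorted (l : List (String × String)) (h : (l.map Prod.fst).Nodup) :
    (PySem.List.sorted l (fun kv => kv.1) false).Pairwise (fun x y => x.1 < y.1) := by
  have hp := PySem.List.sorted_perm l (fun kv => kv.1) false
  have hle := PySem.List.sorted_pairwise l (fun kv : String × String => kv.1)
  have hnd : ((PySem.List.sorted l (fun kv => kv.1) false).map Prod.fst).Nodup :=
    ((hp.map Prod.fst).nodup_iff).mpr h
  have hne : (PySem.List.sorted l (fun kv => kv.1) false).Pairwise (fun a b => a.1 ≠ b.1) :=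
    List.pairwise_map.mp hnd
  exact (hle.and hne).imp (fun hx => lt_of_le_of_ne hx.1 hx.2)

theorem pvContainsPerm (l l' : List String) (hp : l.Perm l') (x : String) :
    l.contains x = l'.contains x := by
  rw [Bool.eq_iff_iff]; simp [hp.mem_iff]

-- first-match lookup is permutation-invariant once the keys are duplicate-free
theorem pvGetMkPerm (l l' : List (String × String)) (hnd : (l.map Prod.fst).Nodup)
    (hp : l'.Perm l) (k : String) :
    (PySem.Dict.mk l').get? k = (PySem.Dict.mk l).get? k := by
  have hnd' : (l'.map Prod.fst).Nodup := ((hp.map Prod.fst).nodup_iff).mpr hnd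
  cases hL : (PySem.Dict.mk l).get? k with
  | none =>
    have hk : k ∉ (PySem.Dict.mk l).keys := (PySem.Dict.get?_eq_none_iff_not_mem_keys _ _).mp hL
    have hk' : k ∉ (PySem.Dict.mk l').keys := by
      intro hm
      exact hk (((hp.map Prod.fst).mem_iff).mp hm)
    exact (PySem.Dict.get?_eq_none_iff_not_mem_keys _ _).mpr hk'
  | some v =>
    have hmem : (k, v) ∈ l := PySem.Dict.mem_items_of_get?_eq_some _ hL
    exact pvGetMkNodup l' k v hnd' (hp.mem_iff.mpr hmem)

theorem pvB_eq_render (before after : List (String × String))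
    (hb : (before.map Prod.fst).Nodup) (ha : (after.map Prod.fst).Nodup) :
    generate_diff_summary_py_alt before after
      = pvRender
          (↑(after.countP (fun kv => !((before.map Prod.fst).contains kv.1))))
          (↑(before.countP (fun kv => !((after.map Prod.fst).contains kv.1))))
          (↑(after.countP (fun kv => ((before.map Prod.fst).contains kv.1)
              && ((PySem.Dict.mk before).get? kv.1 != some kv.2)))) := by
  have hpb := PySem.List.sorted_perm before (fun kv => kv.1) false
  have hpa := PySem.List.sorted_perm after (fun kv => kv.1) false
  have e1 : (PySem.List.sorted after (fun kv => kv.1) false).countP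
        (fun kv => !(((PySem.List.sorted before (fun kv => kv.1) false).map Prod.fst).contains kv.1))
      = after.countP (fun kv => !((before.map Prod.fst).contains kv.1)) := by
    refine (List.countP_congr ?_).trans (hpa.countP_eq _)
    intro kv _
    rw [pvContainsPerm _ _ (hpb.map Prod.fst) kv.1]
  have e2 : (PySem.List.sorted before (fun kv => kv.1) false).countP
        (fun kv => !(((PySem.List.sorted after (fun kv => kv.1) false).map Prod.fst).contains kv.1))
      = before.countP (fun kv => !((after.map Prod.fst).contains kv.1)) := by
    refine (List.countP_congr ?_).trans (hpb.countP_eq _)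
    intro kv _
    rw [pvContainsPerm _ _ (hpa.map Prod.fst) kv.1]
  have e3 : (PySem.List.sorted after (fun kv => kv.1) false).countP
        (fun kv => (((PySem.List.sorted before (fun kv => kv.1) false).map Prod.fst).contains kv.1)
          && ((PySem.Dict.mk (PySem.List.sorted before (fun kv => kv.1) false)).get? kv.1 != some kv.2))
      = after.countP (fun kv => ((before.map Prod.fst).contains kv.1)
          && ((PySem.Dict.mk before).get? kv.1 != some kv.2)) := by
    refine (List.countP_congr ?_).trans (hpa.countP_eq _)
    intro kv _
    rw [pvContainsPerm _ _ (hpb.map Prod.fst) kv.1, pvGetMkPerm before _ hb hpb kv.1]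
  simp only [generate_diff_summary_py_alt]
  rw [pvMergeSpec _ _ (pvStrictSorted before hb) (pvStrictSorted after ha), e1, e2, e3]
  generalize (↑(after.countP (fun kv => !((before.map Prod.fst).contains kv.1))) : Int) = x
  generalize (↑(before.countP (fun kv => !((after.map Prod.fst).contains kv.1))) : Int) = y
  generalize (↑(after.countP (fun kv => ((before.map Prod.fst).contains kv.1)
      && ((PySem.Dict.mk before).get? kv.1 != some kv.2))) : Int) = z
  by_cases h1 : x = 0 <;> by_cases h2 : y = 0 <;> by_cases h3 : z = 0 <;>
    simp [pvRender, h1, h2, h3]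

-- ===== VERDICT (by name: the statement is the Claim_ definition above) =====
theorem generate_diff_summary_py_spec : Claim_equal_generate_diff_summary_py := by
  intro before after _ hpre
  obtain ⟨hb, ha⟩ := hpre
  unfold Spec_generate_diff_summary_py
  exact (pvA_eq_render before after hb ha).trans (pvB_eq_render before after hb ha).symm
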